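-- pv_equiv track=rewrite | github.com/scrapperDubiBear/Covering-Array-Generation | CAGen.py | countMissingPairs
-- ===== SOURCE A (Python) =====
-- pairs = set(((0,0), (0,1), (1,0), (1,1)))
--
-- def countMissingPairs(matrix, cols, rows = 4):
--     '''
--         Returns the number of missing pairs
--     '''
--     count = 0
--     results = []
--     for i in range(cols):
--         for j in range(i + 1, cols):
--             pairsFound = set()
--
--             for k in range(rows):
--                 pairsFound.add((matrix[k][i], matrix[k][j]))
--
--             if pairsFound == pairs:         #might want to remove result array as it is serving no purpose.
--                 results.append(True)
--             else:
--                 results.append(False)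
--                 count += len(pairs.difference(pairsFound))
--     return count
-- ===== SOURCE B (Python) =====
-- def countMissingPairs(matrix, cols, rows = 4):
--     '''
--         Returns the number of missing pairs
--     '''
--     count = 0
--     for i in range(cols):
--         for j in range(i + 1, cols):
--             for (a, b) in ((0, 0), (0, 1), (1, 0), (1, 1)):
--                 if not any(matrix[k][i] == a and matrix[k][j] == b for k in range(rows)):
--                     count += 1
--     return count
-- ===== Notes on version B (the rewrite author's own statement) =====
-- stated objective: simpler
-- what changed: For each column pair B probes each of the four canonical (a,b) pairs directly by scanning the rows for a witness, instead of building a set of observed pairs and taking the size of the set difference; the inert results list and the if/else are dropped.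
import Mathlib
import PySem

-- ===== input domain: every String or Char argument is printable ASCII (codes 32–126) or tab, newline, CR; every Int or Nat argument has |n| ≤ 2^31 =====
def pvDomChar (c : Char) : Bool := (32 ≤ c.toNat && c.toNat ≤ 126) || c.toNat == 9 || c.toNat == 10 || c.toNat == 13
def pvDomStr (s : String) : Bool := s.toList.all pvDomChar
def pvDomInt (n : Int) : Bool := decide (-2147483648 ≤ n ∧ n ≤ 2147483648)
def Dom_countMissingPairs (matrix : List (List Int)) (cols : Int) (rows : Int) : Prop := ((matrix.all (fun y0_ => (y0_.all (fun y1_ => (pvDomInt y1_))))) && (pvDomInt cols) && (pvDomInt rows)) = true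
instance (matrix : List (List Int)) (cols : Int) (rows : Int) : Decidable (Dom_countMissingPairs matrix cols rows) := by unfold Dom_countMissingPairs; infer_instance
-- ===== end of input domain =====

-- B replaces A's per-column-pair observed-set construction and set difference by a direct
-- row scan for each of the four canonical pairs, and drops the inert results list (objective: simpler).

-- ===== PORT A =====
-- the module constant `pairs`
def pvPairs : PySem.Set (Int × Int) := PySem.Set.ofList [(0,0), (0,1), (1,0), (1,1)]

-- matrix[k][i]: k, i are nonnegative here; the out-of-range IndexError cases are excluded by Pre_
def pvCell (matrix : List (List Int)) (k i : Int) : Int :=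
  PySem.List.pyGetD (PySem.List.pyGetD matrix k []) i 0

def countMissingPairs (matrix : List (List Int)) (cols : Int) (rows : Int) : Int :=
  ((PySem.List.pyRange 0 cols 1).foldl (fun st i =>
    (PySem.List.pyRange (i + 1) cols 1).foldl (fun st j =>
      let pairsFound : PySem.Set (Int × Int) :=
        (PySem.List.pyRange 0 rows 1).foldl
          (fun s k => PySem.Set.add s (pvCell matrix k i, pvCell matrix k j)) PySem.Set.empty
      if PySem.Set.equal pairsFound pvPairs then
        (st.1, st.2 ++ [true])
      else
        (st.1 + ((PySem.Set.diff pvPairs pairsFound).length : Int), st.2 ++ [false])) st)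
    ((0 : Int), ([] : List Bool))).1

-- ===== PORT B =====
def pvTargets : List (Int × Int) := [(0,0), (0,1), (1,0), (1,1)]

def countMissingPairs_alt (matrix : List (List Int)) (cols : Int) (rows : Int) : Int :=
  (PySem.List.pyRange 0 cols 1).foldl (fun c i =>
    (PySem.List.pyRange (i + 1) cols 1).foldl (fun c j =>
      pvTargets.foldl (fun c ab =>
        if (PySem.List.pyRange 0 rows 1).any (fun k =>
             pvCell matrix k i == ab.1 && pvCell matrix k j == ab.2) then c
        else c + 1) c) c) 0

-- ===== PRECONDITION & SPEC =====
-- Pre_ excludes exactly the inputs on which Python A raises IndexError: whenever there is at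
-- least one column pair (1 < cols) and at least one row index to scan (0 < rows), the first
-- `rows` rows must exist and each of them must have at least `cols` entries.
def Pre_countMissingPairs (matrix : List (List Int)) (cols : Int) (rows : Int) : Prop :=
  1 < cols → 0 < rows →
    (rows ≤ (matrix.length : Int) ∧ ∀ row ∈ matrix.take rows.toNat, cols ≤ (row.length : Int))
instance (matrix : List (List Int)) (cols : Int) (rows : Int) : Decidable (Pre_countMissingPairs matrix cols rows) := by unfold Pre_countMissingPairs; infer_instance

def pvWitness_countMissingPairs : List (List Int) × Int × Int := ([[0,0],[0,1],[1,1]], 2, 3)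

def Spec_countMissingPairs (matrix : List (List Int)) (cols : Int) (rows : Int) (out : Int) : Prop := out = countMissingPairs_alt matrix cols rows
instance (matrix : List (List Int)) (cols : Int) (rows : Int) (out : Int) : Decidable (Spec_countMissingPairs matrix cols rows out) := by unfold Spec_countMissingPairs; infer_instance

-- ===== CLAIM (what is proved, stated in full; the proofs are below) =====
def Claim_equal_countMissingPairs : Prop := ∀ (matrix : List (List Int)) (cols : Int) (rows : Int), Dom_countMissingPairs matrix cols rows → Pre_countMissingPairs matrix cols rows → Spec_countMissingPairs matrix cols rows (countMissingPairs matrix cols rows)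

-- ===== LEMMAS AND PROOFS =====

-- the observed set A builds for a column pair (i, j)
def pvFound (matrix : List (List Int)) (rows i j : Int) : PySem.Set (Int × Int) :=
  (PySem.List.pyRange 0 rows 1).foldl
    (fun s k => PySem.Set.add s (pvCell matrix k i, pvCell matrix k j)) PySem.Set.empty

lemma mem_pvFound (matrix : List (List Int)) (rows i j : Int) (p : Int × Int) :
    p ∈ pvFound matrix rows i j ↔
      ∃ k ∈ PySem.List.pyRange 0 rows 1, p = (pvCell matrix k i, pvCell matrix k j) := by
  unfold pvFound
  rw [PySem.Set.mem_foldl_add]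
  simp [PySem.Set.empty]

-- B's row scan for (a, b) is exactly the membership test in A's observed set
lemma any_eq_contains (matrix : List (List Int)) (rows i j a b : Int) :
    ((PySem.List.pyRange 0 rows 1).any (fun k =>
        pvCell matrix k i == a && pvCell matrix k j == b))
      = PySem.Set.contains (pvFound matrix rows i j) (a, b) := by
  rw [Bool.eq_iff_iff, List.any_eq_true, PySem.Set.contains_iff, mem_pvFound]
  constructor
  · rintro ⟨k, hk, h⟩
    simp only [Bool.and_eq_true, beq_iff_eq] at h
    exact ⟨k, hk, by rw [h.1, h.2]⟩
  · rintro ⟨k, hk, h⟩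
    exact ⟨k, hk, by simp [Prod.ext_iff] at h; simp [h.1, h.2]⟩

-- A's per-column-pair increment (set-difference size, including the inert equality branch)
-- equals B's fold over the four canonical pairs
lemma inner_eq (matrix : List (List Int)) (rows i j : Int) (c : Int) :
    (if PySem.Set.equal (pvFound matrix rows i j) pvPairs then c
     else c + ((PySem.Set.diff pvPairs (pvFound matrix rows i j)).length : Int))
    = [((0:Int),(0:Int)), (0,1), (1,0), (1,1)].foldl (fun c ab =>
        if (PySem.List.pyRange 0 rows 1).any (fun k =>
             pvCell matrix k i == ab.1 && pvCell matrix k j == ab.2) then c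
        else c + 1) c := by
  have e00 := any_eq_contains matrix rows i j 0 0
  have e01 := any_eq_contains matrix rows i j 0 1
  have e10 := any_eq_contains matrix rows i j 1 0
  have e11 := any_eq_contains matrix rows i j 1 1
  simp only [List.foldl, e00, e01, e10, e11]
  set S := pvFound matrix rows i j
  clear_value S
  have hdiff : PySem.Set.diff pvPairs S =
      List.filter (fun x => !S.contains x) [(0,0), (0,1), (1,0), (1,1)] := rfl
  by_cases heq : PySem.Set.equal S pvPairs = true
  · have hmem := (PySem.Set.equal_iff S pvPairs).mp heq
    have h00 : ((0:Int),(0:Int)) ∈ S := by rw [hmem]; decide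
    have h01 : ((0:Int),(1:Int)) ∈ S := by rw [hmem]; decide
    have h10 : ((1:Int),(0:Int)) ∈ S := by rw [hmem]; decide
    have h11 : ((1:Int),(1:Int)) ∈ S := by rw [hmem]; decide
    simp [heq, h00, h01, h10, h11]
  · simp only [heq]
    rw [hdiff]
    by_cases h00 : ((0:Int),(0:Int)) ∈ S <;>
    by_cases h01 : ((0:Int),(1:Int)) ∈ S <;>
    by_cases h10 : ((1:Int),(0:Int)) ∈ S <;>
    by_cases h11 : ((1:Int),(1:Int)) ∈ S <;>
      simp [h00, h01, h10, h11] <;> omega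

-- A's pair-state fold projected to its count component
lemma pv_foldl_fst {β γ : Type} (f : (Int × γ) → β → (Int × γ)) (F : Int → β → Int)
    (h : ∀ st x, (f st x).1 = F st.1 x) : ∀ (l : List β) (st : Int × γ),
      (l.foldl f st).1 = l.foldl F st.1 := by
  intro l
  induction l with
  | nil => intro st; rfl
  | cons x xs ih => intro st; rw [List.foldl_cons, List.foldl_cons, ih, h]

-- ===== VERDICT (by name: the statement is the Claim_ definition above) =====
theorem countMissingPairs_spec : Claim_equal_countMissingPairs := by
  intro matrix cols rows _ _
  unfold Spec_countMissingPairs countMissingPairs countMissingPairs_alt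
  rw [pv_foldl_fst _
    (fun c i => (PySem.List.pyRange (i + 1) cols 1).foldl (fun c j =>
      if PySem.Set.equal (pvFound matrix rows i j) pvPairs then c
      else c + ((PySem.Set.diff pvPairs (pvFound matrix rows i j)).length : Int)) c)
    (by
      intro st i
      exact pv_foldl_fst _
        (fun c j => if PySem.Set.equal (pvFound matrix rows i j) pvPairs then c
          else c + ((PySem.Set.diff pvPairs (pvFound matrix rows i j)).length : Int))
        (by
          intro st j
          simp only [pvFound, PySem.Set.empty]
          split <;> rfl) _ _)]
  congr 1
  funext c i
  congr 1
  funext c j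
  exact inner_eq matrix rows i j c
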